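-- pv_equiv track=rewrite | github.com/alumnos-ingcom/TP5-FNT138 | Funciones/tp5ej5.py | inversion_letras
-- ===== SOURCE A (Python) =====
-- def inversion_letras(palabra, diccionario, diccionario2):
--
--     cambiada = ""
--     for letra in palabra:
--         if letra >= 'A' and letra <='Z':
--             for k,v in diccionario.items():
--                 letra = letra.replace(k, v)
--             cambiada = cambiada + letra
--         elif letra >= 'a' and letra <='z':
--             for k,v in diccionario2.items():
--                 letra = letra.replace(k, v)
--             cambiada = cambiada + letra
--         elif letra ==  " ":
--             cambiada = cambiada + " "
--     return cambiada
-- ===== SOURCE B (Python) =====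
-- def inversion_letras(palabra, diccionario, diccionario2):
--     def chain(c, d):
--         for k, v in d.items():
--             c = c.replace(k, v)
--         return c
--     upper = {chr(i): chain(chr(i), diccionario) for i in range(ord('A'), ord('Z') + 1)}
--     lower = {chr(i): chain(chr(i), diccionario2) for i in range(ord('a'), ord('z') + 1)}
--     out = []
--     for letra in palabra:
--         if letra in upper:
--             out.append(upper[letra])
--         elif letra in lower:
--             out.append(lower[letra])
--         elif letra == " ":
--             out.append(" ")
--     return "".join(out)
-- ===== Notes on version B (the rewrite author's own statement) =====
-- stated objective: faster
-- what changed: Instead of rescanning the whole dictionary for every letter of the word, B precomputes the chained replacement of each of the 52 letters once (a lookup table per case), then makes a single pass over the word appending table lookups and joining at the end.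
import Mathlib
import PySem

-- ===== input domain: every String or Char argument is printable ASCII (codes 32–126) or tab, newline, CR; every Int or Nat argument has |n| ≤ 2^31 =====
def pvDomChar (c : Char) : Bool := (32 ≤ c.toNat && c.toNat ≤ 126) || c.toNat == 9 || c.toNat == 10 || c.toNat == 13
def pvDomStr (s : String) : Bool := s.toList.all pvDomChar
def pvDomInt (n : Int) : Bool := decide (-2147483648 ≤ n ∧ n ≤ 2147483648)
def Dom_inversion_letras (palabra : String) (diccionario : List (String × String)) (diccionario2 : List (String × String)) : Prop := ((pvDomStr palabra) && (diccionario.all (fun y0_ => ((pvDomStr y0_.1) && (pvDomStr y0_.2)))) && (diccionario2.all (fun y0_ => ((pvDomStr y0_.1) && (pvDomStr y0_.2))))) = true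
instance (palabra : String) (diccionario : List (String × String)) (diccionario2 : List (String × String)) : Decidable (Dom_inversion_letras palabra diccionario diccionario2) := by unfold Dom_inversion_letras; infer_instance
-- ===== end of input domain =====

-- B precomputes each letter's chained replacement once in two 26-entry tables and then
-- translates the word in a single lookup pass (faster: per-letter dictionary rescans removed).


-- ===== PORT A =====
-- Literal port of A: one fold over the word; for each letter in range the dict items are
-- folded with str.replace (the letter is a 1-char string, so Python's string '<=' is Char '≤').
def inversion_letras (palabra : String) (diccionario : List (String × String)) (diccionario2 : List (String × String)) : String :=
  palabra.toList.foldl (fun cambiada letra =>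
    if 'A' ≤ letra ∧ letra ≤ 'Z' then
      cambiada ++ ((PySem.Dict.ofList diccionario).items).foldl
        (fun l kv => PySem.Str.replace l kv.1 kv.2) (String.singleton letra)
    else if 'a' ≤ letra ∧ letra ≤ 'z' then
      cambiada ++ ((PySem.Dict.ofList diccionario2).items).foldl
        (fun l kv => PySem.Str.replace l kv.1 kv.2) (String.singleton letra)
    else if letra = ' ' then cambiada ++ " "
    else cambiada) ""

-- ===== PORT B =====
-- chain(c, d): fold the dict items over c with str.replace
def pvChain (c : String) (d : List (String × String)) : String :=
  ((PySem.Dict.ofList d).items).foldl (fun s kv => PySem.Str.replace s kv.1 kv.2) c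

def inversion_letras_alt (palabra : String) (diccionario : List (String × String)) (diccionario2 : List (String × String)) : String :=
  let upper : PySem.Dict Char String := PySem.Dict.ofList
    ((PySem.List.pyRange 65 91 1).map (fun i => (Char.ofNat i.toNat, pvChain (String.singleton (Char.ofNat i.toNat)) diccionario)))
  let lower : PySem.Dict Char String := PySem.Dict.ofList
    ((PySem.List.pyRange 97 123 1).map (fun i => (Char.ofNat i.toNat, pvChain (String.singleton (Char.ofNat i.toNat)) diccionario2)))
  let out := palabra.toList.foldl (fun acc letra =>
    match upper.get? letra with
    | some s => acc ++ [s]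
    | none =>
      match lower.get? letra with
      | some s => acc ++ [s]
      | none => if letra = ' ' then acc ++ [" "] else acc) ([] : List String)
  PySem.Str.join "" out

-- ===== PRECONDITION & SPEC =====
def Spec_inversion_letras (palabra : String) (diccionario : List (String × String)) (diccionario2 : List (String × String)) (out : String) : Prop := out = inversion_letras_alt palabra diccionario diccionario2
instance (palabra : String) (diccionario : List (String × String)) (diccionario2 : List (String × String)) (out : String) : Decidable (Spec_inversion_letras palabra diccionario diccionario2 out) := by unfold Spec_inversion_letras; infer_instance

-- ===== CLAIM (what is proved, stated in full; the proofs are below) =====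
def Claim_equal_inversion_letras : Prop := ∀ (palabra : String) (diccionario : List (String × String)) (diccionario2 : List (String × String)), Dom_inversion_letras palabra diccionario diccionario2 → Spec_inversion_letras palabra diccionario diccionario2 (inversion_letras palabra diccionario diccionario2)

-- ===== LEMMAS AND PROOFS =====

-- sep = "": join is flatten
lemma pvJoinNil (l : List (List Char)) : PySem.Chars.join [] l = l.flatten := by
  induction l with
  | nil => simp [PySem.Chars.join_nil]
  | cons p rest ih =>
    cases rest with
    | nil => simp [PySem.Chars.join_singleton]
    | cons q r => rw [PySem.Chars.join_cons_cons]; simp at ih ⊢; rw [ih]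

lemma pvJoinAppendOne (acc : List String) (s : String) :
    PySem.Str.join "" (acc ++ [s]) = PySem.Str.join "" acc ++ s := by
  apply String.toList_inj.mp
  simp [PySem.Str.toList_join, pvJoinNil]

-- lookup in a table built over distinct keys
lemma pvGetOfListMap (L : List Char) (f : Char → String) (h : L.Nodup) (c : Char) :
    (PySem.Dict.ofList (L.map (fun k => (k, f k)))).get? c
      = if c ∈ L then some (f c) else none := by
  have hitems : (PySem.Dict.ofList (L.map (fun k => (k, f k)))).items
      = L.map (fun k => (k, f k)) := by
    show (List.foldl (fun acc p => acc.insert p.1 p.2) PySem.Dict.empty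
      (L.map (fun k => (k, f k)))).items = _
    rw [List.foldl_map]
    have := PySem.Dict.items_foldl_insert_fresh L (fun k => k) f PySem.Dict.empty
      (by intro a _; simp [PySem.Dict.contains_empty]) (by simpa using h)
    simpa using this
  have hkeys : (PySem.Dict.ofList (L.map (fun k => (k, f k)))).keys = L := by
    show ((PySem.Dict.ofList (L.map (fun k => (k, f k)))).items).map Prod.fst = L
    rw [hitems]; simp [Function.comp_def]
  split_ifs with hc
  · exact PySem.Dict.get?_of_mem_items _
      (by rw [hitems]; exact List.mem_map_of_mem hc) (by rw [hkeys]; exact h)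
  · exact (PySem.Dict.get?_eq_none_iff_not_mem_keys _ _).mpr (by rw [hkeys]; exact hc)

lemma pvUpperCharsEq : (PySem.List.pyRange 65 91 1).map (fun i => Char.ofNat i.toNat)
    = ['A','B','C','D','E','F','G','H','I','J','K','L','M','N','O','P','Q','R','S','T','U','V','W','X','Y','Z'] := by
  decide

lemma pvLowerCharsEq : (PySem.List.pyRange 97 123 1).map (fun i => Char.ofNat i.toNat)
    = ['a','b','c','d','e','f','g','h','i','j','k','l','m','n','o','p','q','r','s','t','u','v','w','x','y','z'] := by
  decide

lemma pvMemUpper (c : Char) :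
    c ∈ (PySem.List.pyRange 65 91 1).map (fun i => Char.ofNat i.toNat) ↔ ('A' ≤ c ∧ c ≤ 'Z') := by
  rw [pvUpperCharsEq]
  constructor
  · intro h; fin_cases h <;> exact ⟨by decide, by decide⟩
  · rintro ⟨h1, h2⟩
    rw [Char.le_def, UInt32.le_iff_toNat_le] at h1 h2
    have h1' : 65 ≤ c.toNat := h1
    have h2' : c.toNat ≤ 90 := h2
    rw [← Char.ofNat_toNat c]
    generalize c.toNat = n at h1' h2' ⊢
    interval_cases n <;> decide

lemma pvMemLower (c : Char) :
    c ∈ (PySem.List.pyRange 97 123 1).map (fun i => Char.ofNat i.toNat) ↔ ('a' ≤ c ∧ c ≤ 'z') := by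
  rw [pvLowerCharsEq]
  constructor
  · intro h; fin_cases h <;> exact ⟨by decide, by decide⟩
  · rintro ⟨h1, h2⟩
    rw [Char.le_def, UInt32.le_iff_toNat_le] at h1 h2
    have h1' : 97 ≤ c.toNat := h1
    have h2' : c.toNat ≤ 122 := h2
    rw [← Char.ofNat_toNat c]
    generalize c.toNat = n at h1' h2' ⊢
    interval_cases n <;> decide

lemma pvGetUpper (d : List (String × String)) (c : Char) :
    (PySem.Dict.ofList ((PySem.List.pyRange 65 91 1).map
        (fun i => (Char.ofNat i.toNat, pvChain (String.singleton (Char.ofNat i.toNat)) d)))).get? c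
      = if 'A' ≤ c ∧ c ≤ 'Z' then some (pvChain (String.singleton c) d) else none := by
  have h := pvGetOfListMap ((PySem.List.pyRange 65 91 1).map (fun i => Char.ofNat i.toNat))
    (fun k => pvChain (String.singleton k) d) (by rw [pvUpperCharsEq]; decide) c
  rw [List.map_map] at h
  rw [show ((fun k => (k, pvChain (String.singleton k) d)) ∘ fun i => Char.ofNat i.toNat)
      = fun i : Int => (Char.ofNat i.toNat, pvChain (String.singleton (Char.ofNat i.toNat)) d) from rfl] at h
  rw [h]; simp only [pvMemUpper]

lemma pvGetLower (d : List (String × String)) (c : Char) :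
    (PySem.Dict.ofList ((PySem.List.pyRange 97 123 1).map
        (fun i => (Char.ofNat i.toNat, pvChain (String.singleton (Char.ofNat i.toNat)) d)))).get? c
      = if 'a' ≤ c ∧ c ≤ 'z' then some (pvChain (String.singleton c) d) else none := by
  have h := pvGetOfListMap ((PySem.List.pyRange 97 123 1).map (fun i => Char.ofNat i.toNat))
    (fun k => pvChain (String.singleton k) d) (by rw [pvLowerCharsEq]; decide) c
  rw [List.map_map] at h
  rw [show ((fun k => (k, pvChain (String.singleton k) d)) ∘ fun i => Char.ofNat i.toNat)
      = fun i : Int => (Char.ofNat i.toNat, pvChain (String.singleton (Char.ofNat i.toNat)) d) from rfl] at h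
  rw [h]; simp only [pvMemLower]

lemma pvLoopEq (d1 d2 : List (String × String)) (cs : List Char) : ∀ (acc : List String),
    cs.foldl (fun cambiada letra =>
      if 'A' ≤ letra ∧ letra ≤ 'Z' then
        cambiada ++ pvChain (String.singleton letra) d1
      else if 'a' ≤ letra ∧ letra ≤ 'z' then
        cambiada ++ pvChain (String.singleton letra) d2
      else if letra = ' ' then cambiada ++ " "
      else cambiada) (PySem.Str.join "" acc)
    = PySem.Str.join "" (cs.foldl (fun acc letra =>
        match (if 'A' ≤ letra ∧ letra ≤ 'Z' then some (pvChain (String.singleton letra) d1) else none) with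
        | some s => acc ++ [s]
        | none =>
          match (if 'a' ≤ letra ∧ letra ≤ 'z' then some (pvChain (String.singleton letra) d2) else none) with
          | some s => acc ++ [s]
          | none => if letra = ' ' then acc ++ [" "] else acc) acc) := by
  induction cs with
  | nil => intro acc; rfl
  | cons c cs ih =>
    intro acc
    simp only [List.foldl_cons]
    by_cases hu : 'A' ≤ c ∧ c ≤ 'Z'
    · rw [if_pos hu]
      have := ih (acc ++ [pvChain (String.singleton c) d1])
      rw [pvJoinAppendOne] at this
      rw [this]
      simp only [if_pos hu]
    · rw [if_neg hu]
      by_cases hl : 'a' ≤ c ∧ c ≤ 'z'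
      · rw [if_pos hl]
        have := ih (acc ++ [pvChain (String.singleton c) d2])
        rw [pvJoinAppendOne] at this
        rw [this]
        simp only [if_neg hu, if_pos hl]
      · rw [if_neg hl]
        by_cases hs : c = ' '
        · rw [if_pos hs]
          have := ih (acc ++ [" "])
          rw [pvJoinAppendOne] at this
          rw [this]
          simp only [if_neg hu, if_neg hl, if_pos hs]
        · rw [if_neg hs]
          rw [ih acc]
          simp only [if_neg hu, if_neg hl, if_neg hs]

-- ===== VERDICT (by name: the statement is the Claim_ definition above) =====
theorem inversion_letras_spec : Claim_equal_inversion_letras := by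
  intro palabra d1 d2 _
  show inversion_letras palabra d1 d2 = inversion_letras_alt palabra d1 d2
  unfold inversion_letras inversion_letras_alt
  simp only [pvGetUpper, pvGetLower]
  have h := pvLoopEq d1 d2 palabra.toList []
  have hnil : PySem.Str.join "" ([] : List String) = "" := by
    apply String.toList_inj.mp
    simp [PySem.Str.toList_join]
  rw [hnil] at h
  exact h
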